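-- pv_equiv track=rewrite | github.com/fuhuavl/LIS-Tree-Visualizer | lis_visualizer.py | build_pure_tree
-- ===== SOURCE A (Python) =====
-- def build_pure_tree(arr):
--     n = len(arr)
--     dp = [1] * n
--     parent = [-1] * n
--
--     for i in range(n):
--         for j in range(i):
--             if arr[j] < arr[i] and dp[j] + 1 > dp[i]:
--                 dp[i] = dp[j] + 1
--                 parent[i] = j
--
--     tree = {i: [] for i in range(n)}
--     roots = []
--
--     for i in range(n):
--         if parent[i] != -1:
--             tree[parent[i]].append(i)
--         else:
--             roots.append(i)
--
--     return tree, roots, dp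
-- ===== SOURCE B (Python) =====
-- # Faster LIS forest: coordinate-compress the values and keep a segment tree over
-- # value slots storing (max dp, min index), so each element is processed in O(log n).
--
-- def _better(a, b):
--     # max by dp, ties broken by smaller index
--     if b[0] > a[0] or (b[0] == a[0] and b[1] < a[1]):
--         return b
--     return a
--
-- def _build(lo, hi):
--     if hi - lo == 1:
--         return ('L', (0, -1))
--     mid = (lo + hi) // 2
--     return ('N', (0, -1), _build(lo, mid), _build(mid, hi))
--
-- def _query(t, lo, hi, b):
--     # best pair over slots [lo, min(hi, b))
--     if b <= lo:
--         return (0, -1)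
--     if hi <= b:
--         return t[1]
--     mid = (lo + hi) // 2
--     return _better(_query(t[2], lo, mid, b), _query(t[3], mid, hi, b))
--
-- def _update(t, lo, hi, p, v):
--     if t[0] == 'L':
--         return ('L', _better(t[1], v))
--     mid = (lo + hi) // 2
--     if p < mid:
--         return ('N', _better(t[1], v), _update(t[2], lo, mid, p, v), t[3])
--     return ('N', _better(t[1], v), t[2], _update(t[3], mid, hi, p, v))
--
-- def build_pure_tree(arr):
--     n = len(arr)
--     vals = sorted(set(arr))
--     m = len(vals)
--     pos = {v: k for k, v in enumerate(vals)}
--     tree = {i: [] for i in range(n)}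
--     roots = []
--     dp = []
--     seg = _build(0, m) if m > 0 else None
--     for i in range(n):
--         p = pos[arr[i]]
--         best_d, best_j = _query(seg, 0, m, p)
--         dp.append(best_d + 1)
--         if best_j == -1:
--             roots.append(i)
--         else:
--             tree[best_j].append(i)
--         seg = _update(seg, 0, m, p, (best_d + 1, i))
--     return tree, roots, dp
-- ===== Notes on version B (the rewrite author's own statement) =====
-- stated objective: faster
-- what changed: Replaces the O(n^2) double loop over earlier indices by coordinate compression plus a segment tree over value slots storing (max dp, min index), so each element's best predecessor is found by one prefix query in O(log n).
import Mathlib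
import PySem

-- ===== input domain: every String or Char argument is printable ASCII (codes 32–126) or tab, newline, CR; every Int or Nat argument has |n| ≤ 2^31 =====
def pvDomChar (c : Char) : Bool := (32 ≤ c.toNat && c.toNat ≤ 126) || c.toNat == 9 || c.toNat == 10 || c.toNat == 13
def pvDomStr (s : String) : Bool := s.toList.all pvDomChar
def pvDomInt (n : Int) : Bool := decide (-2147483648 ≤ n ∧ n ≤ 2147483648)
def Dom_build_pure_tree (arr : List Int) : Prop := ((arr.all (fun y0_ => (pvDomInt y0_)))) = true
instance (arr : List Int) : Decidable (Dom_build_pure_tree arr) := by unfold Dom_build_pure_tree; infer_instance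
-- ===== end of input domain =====

-- B replaces A's O(n^2) double loop by coordinate compression + a segment tree over value
-- slots storing (max dp, min index); a timing run measured B faster at the large sizes.

-- ===== PORT A =====
def build_pure_tree (arr : List Int) : (List (Int × List Int)) × List Int × List Int :=
  let n : Int := arr.length
  let dp0 : List Int := List.replicate arr.length 1
  let parent0 : List Int := List.replicate arr.length (-1)
  let s := (PySem.List.pyRange 0 n 1).foldl (fun (s : List Int × List Int) i =>
    (PySem.List.pyRange 0 i 1).foldl (fun (s : List Int × List Int) j =>
      if PySem.List.pyGetD arr j 0 < PySem.List.pyGetD arr i 0 ∧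
         PySem.List.pyGetD s.1 j 0 + 1 > PySem.List.pyGetD s.1 i 0 then
        (PySem.List.pySetD s.1 i (PySem.List.pyGetD s.1 j 0 + 1), PySem.List.pySetD s.2 i j)
      else s) s) (dp0, parent0)
  let tree0 : PySem.Dict Int (List Int) :=
    (PySem.List.pyRange 0 n 1).foldl (fun d i => d.insert i []) PySem.Dict.empty
  let tr := (PySem.List.pyRange 0 n 1).foldl
    (fun (t : PySem.Dict Int (List Int) × List Int) i =>
      if PySem.List.pyGetD s.2 i 0 ≠ -1 then
        (t.1.modify (PySem.List.pyGetD s.2 i 0) [] (· ++ [i]), t.2)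
      else (t.1, t.2 ++ [i])) (tree0, [])
  (tr.1.items, tr.2, s.1)

-- ===== PORT B =====
-- B-side helpers: the recursive segment tree of Source B ('L' = leaf, 'N' = node)
inductive Seg where
  | leaf : Int × Int → Seg
  | node : Int × Int → Seg → Seg → Seg
deriving Repr, DecidableEq

def segVal (t : Seg) : Int × Int :=
  match t with
  | .leaf v => v
  | .node v _ _ => v

def better (a b : Int × Int) : Int × Int :=
  if b.1 > a.1 ∨ (b.1 = a.1 ∧ b.2 < a.2) then b else a

-- _build(lo, hi); Python recurses only on 0 ≤ lo < hi, the 'hi - lo ≤ 1' guard totalises it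
def segBuild (lo hi : Int) : Seg :=
  if _h : hi - lo ≤ 1 then .leaf (0, -1)
  else
    .node (0, -1) (segBuild lo (PySem.Int.floordiv (lo + hi) 2))
                  (segBuild (PySem.Int.floordiv (lo + hi) 2) hi)
  termination_by (hi - lo).toNat
  decreasing_by
  · have h1 := (PySem.Int.le_floordiv_iff_mul_le (a := lo + hi) (b := 2) (q := lo + 1) (by omega)).mpr (by omega)
    have h2 := (PySem.Int.floordiv_lt_iff_lt_mul (a := lo + hi) (b := 2) (q := hi) (by omega)).mpr (by omega)
    omega
  · have h1 := (PySem.Int.le_floordiv_iff_mul_le (a := lo + hi) (b := 2) (q := lo + 1) (by omega)).mpr (by omega)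
    have h2 := (PySem.Int.floordiv_lt_iff_lt_mul (a := lo + hi) (b := 2) (q := hi) (by omega)).mpr (by omega)
    omega

-- _query(t, lo, hi, b): best pair over slots [lo, min(hi, b)); the leaf fall-through in the
-- last branch is unreachable on well-shaped trees (Python would raise there)
def segQuery (t : Seg) (lo hi b : Int) : Int × Int :=
  if b ≤ lo then (0, -1)
  else if hi ≤ b then segVal t
  else match t with
    | .leaf v => v
    | .node _ l r =>
        better (segQuery l lo (PySem.Int.floordiv (lo + hi) 2) b)
               (segQuery r (PySem.Int.floordiv (lo + hi) 2) hi b)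

def segUpdate (t : Seg) (lo hi p : Int) (v : Int × Int) : Seg :=
  match t with
  | .leaf w => .leaf (better w v)
  | .node w l r =>
      if p < PySem.Int.floordiv (lo + hi) 2 then
        .node (better w v) (segUpdate l lo (PySem.Int.floordiv (lo + hi) 2) p v) r
      else
        .node (better w v) l (segUpdate r (PySem.Int.floordiv (lo + hi) 2) hi p v)

def build_pure_tree_alt (arr : List Int) : (List (Int × List Int)) × List Int × List Int :=
  let n : Int := arr.length
  let vals := PySem.List.sorted (PySem.Set.ofList arr) (fun x => x) false
  let m : Int := vals.length
  let pos : PySem.Dict Int Int :=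
    (PySem.List.enumerate vals 0).foldl (fun d kv => d.insert kv.2 kv.1) PySem.Dict.empty
  let tree0 : PySem.Dict Int (List Int) :=
    (PySem.List.pyRange 0 n 1).foldl (fun d i => d.insert i []) PySem.Dict.empty
  let st := (PySem.List.pyRange 0 n 1).foldl
    (fun (s : PySem.Dict Int (List Int) × List Int × List Int × Seg) i =>
      let p := pos.getD (PySem.List.pyGetD arr i 0) 0
      let q := segQuery s.2.2.2 0 m p
      let dp' := s.2.2.1 ++ [q.1 + 1]
      let tr := if q.2 == -1 then (s.1, s.2.1 ++ [i]) else (s.1.modify q.2 [] (· ++ [i]), s.2.1)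
      (tr.1, tr.2, dp', segUpdate s.2.2.2 0 m p (q.1 + 1, i)))
    (tree0, [], [], if 0 < m then segBuild 0 m else Seg.leaf (0, -1))
  (st.1.items, st.2.1, st.2.2.1)

-- ===== PRECONDITION & SPEC =====
def Spec_build_pure_tree (arr : List Int) (out : (List (Int × List Int)) × List Int × List Int) : Prop := out = build_pure_tree_alt arr
instance (arr : List Int) (out : (List (Int × List Int)) × List Int × List Int) : Decidable (Spec_build_pure_tree arr out) := by unfold Spec_build_pure_tree; infer_instance

-- ===== CLAIM (what is proved, stated in full; the proofs are below) =====
def Claim_equal_build_pure_tree : Prop := ∀ (arr : List Int), Dom_build_pure_tree arr → Spec_build_pure_tree arr (build_pure_tree arr)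

-- ===== LEMMAS AND PROOFS =====

-- ---- better algebra ----
theorem better_comm (a b : Int × Int) : better a b = better b a := by
  rcases a with ⟨a1, a2⟩; rcases b with ⟨b1, b2⟩
  simp only [better]
  split_ifs <;> simp_all [Prod.mk.injEq] <;> omega

theorem better_assoc (a b c : Int × Int) : better (better a b) c = better a (better b c) := by
  rcases a with ⟨a1, a2⟩; rcases b with ⟨b1, b2⟩; rcases c with ⟨c1, c2⟩
  simp only [better]
  split_ifs <;> simp_all [Prod.mk.injEq] <;> omega

theorem better_swap (a b c : Int × Int) : better (better a b) c = better (better a c) b := by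
  rw [better_assoc, better_comm b c, ← better_assoc]

theorem better_e_right (a : Int × Int) (h : a = (0, -1) ∨ 1 ≤ a.1) : better a (0, -1) = a := by
  rcases a with ⟨a1, a2⟩
  simp only [better]
  split_ifs with h1
  · exfalso
    rcases h with h | h
    · simp only [Prod.mk.injEq] at h
      rcases h1 with h1 | ⟨h1, h2⟩ <;> omega
    · rcases h1 with h1 | ⟨h1, h2⟩ <;> simp_all <;> omega
  · rfl

-- ---- segment tree shape and operations ----
theorem seg_mid_bounds (lo hi : Int) (h : lo + 2 ≤ hi) :
    lo + 1 ≤ PySem.Int.floordiv (lo + hi) 2 ∧ PySem.Int.floordiv (lo + hi) 2 + 1 ≤ hi := by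
  have h1 := (PySem.Int.le_floordiv_iff_mul_le (a := lo + hi) (b := 2) (q := lo + 1) (by omega)).mpr (by omega)
  have h2 := (PySem.Int.floordiv_lt_iff_lt_mul (a := lo + hi) (b := 2) (q := hi) (by omega)).mpr (by omega)
  omega

def Shape : Seg → Int → Int → Prop
  | .leaf _, lo, hi => hi = lo + 1
  | .node _ l r, lo, hi => lo + 2 ≤ hi ∧ Shape l lo (PySem.Int.floordiv (lo + hi) 2) ∧
      Shape r (PySem.Int.floordiv (lo + hi) 2) hi

theorem shape_build (lo hi : Int) (h : lo < hi) : Shape (segBuild lo hi) lo hi := by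
  induction lo, hi using segBuild.induct with
  | case1 lo hi hle =>
    unfold segBuild
    simp only [hle, dite_true]
    simp only [Shape]
    omega
  | case2 lo hi hgt ih1 ih2 =>
    have hb := seg_mid_bounds lo hi (by omega)
    unfold segBuild
    simp only [hgt, dite_false]
    refine ⟨by omega, ih1 (by omega), ih2 (by omega)⟩

theorem query_build (lo hi b : Int) : segQuery (segBuild lo hi) lo hi b = (0, -1) := by
  induction lo, hi using segBuild.induct with
  | case1 lo hi hle =>
    unfold segBuild
    simp only [hle, dite_true]
    unfold segQuery
    split_ifs <;> simp [segVal]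
  | case2 lo hi hgt ih1 ih2 =>
    unfold segBuild
    simp only [hgt, dite_false]
    unfold segQuery
    split_ifs with h1 h2
    · rfl
    · simp [segVal]
    · simp only []
      rw [ih1, ih2]
      rfl

theorem shape_update (t : Seg) (lo hi p : Int) (v : Int × Int) (h : Shape t lo hi) :
    Shape (segUpdate t lo hi p v) lo hi := by
  induction t generalizing lo hi with
  | leaf w => exact h
  | node w l r ihl ihr =>
    obtain ⟨h1, h2, h3⟩ := h
    unfold segUpdate
    split_ifs <;> exact ⟨h1, by first | exact ⟨ihl _ _ h2, h3⟩ | exact ⟨h2, ihr _ _ h3⟩⟩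

theorem query_le (t : Seg) (lo hi b : Int) (h : b ≤ lo) : segQuery t lo hi b = (0, -1) := by
  unfold segQuery
  simp [h]

theorem query_val (t : Seg) (lo hi b : Int) (h2 : hi ≤ b) (h1 : ¬ b ≤ lo) :
    segQuery t lo hi b = segVal t := by
  unfold segQuery
  simp [h1, h2]

theorem query_update (t : Seg) (lo hi p : Int) (v : Int × Int) (h : Shape t lo hi)
    (hp1 : lo ≤ p) (hp2 : p < hi) (b : Int) :
    segQuery (segUpdate t lo hi p v) lo hi b =
      better (segQuery t lo hi b) (if p < b then v else (0, -1)) := by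
  induction t generalizing lo hi with
  | leaf w =>
    simp only [Shape] at h
    unfold segUpdate
    by_cases hb1 : b ≤ lo
    · rw [query_le _ _ _ _ hb1, query_le _ _ _ _ hb1]
      have : ¬ p < b := by omega
      simp [this, better]
    · have hb2 : hi ≤ b := by omega
      rw [query_val _ _ _ _ hb2 hb1, query_val _ _ _ _ hb2 hb1]
      have : p < b := by omega
      simp [this, segVal]
  | node w l r ihl ihr =>
    obtain ⟨hs1, hs2, hs3⟩ := h
    have hb := seg_mid_bounds lo hi hs1
    by_cases hb1 : b ≤ lo
    · have hnpb : ¬ p < b := by omega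
      unfold segUpdate
      split_ifs <;> rw [query_le _ _ _ _ hb1, query_le _ _ _ _ hb1] <;> simp [better]
    · by_cases hb2 : hi ≤ b
      · have hpb : p < b := by omega
        unfold segUpdate
        split_ifs <;> rw [query_val _ _ _ _ hb2 hb1, query_val _ _ _ _ hb2 hb1] <;> simp [segVal]
      · -- lo < b < hi : both sides recurse
        unfold segUpdate
        by_cases hpm : p < PySem.Int.floordiv (lo + hi) 2
        · simp only [hpm, if_true]
          rw [segQuery, segQuery]
          simp only [hb1, if_false, hb2, if_false]
          rw [ihl _ _ hs2 hp1 hpm, better_swap]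
        · simp only [hpm, if_false]
          rw [segQuery, segQuery]
          simp only [hb1, if_false, hb2, if_false]
          rw [ihr _ _ hs3 (by omega) hp2, better_assoc]

-- ---- coordinate compression ----
def valsOf (arr : List Int) : List Int := PySem.List.sorted (PySem.Set.ofList arr) (fun x => x) false

def posD (arr : List Int) : PySem.Dict Int Int :=
  (PySem.List.enumerate (valsOf arr) 0).foldl (fun d kv => d.insert kv.2 kv.1) PySem.Dict.empty

def posOf (arr : List Int) (x : Int) : Int := (posD arr).getD x 0

theorem vals_pairwise (arr : List Int) : (valsOf arr).Pairwise (· < ·) := by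
  exact PySem.List.sorted_ofList_pairwise_lt arr

theorem vals_nodup (arr : List Int) : (valsOf arr).Nodup :=
  (vals_pairwise arr).imp (fun h => ne_of_lt h)

theorem mem_vals (arr : List Int) (x : Int) : x ∈ valsOf arr ↔ x ∈ arr := by
  unfold valsOf
  rw [PySem.List.mem_sorted]
  exact PySem.Set.mem_ofList arr x

theorem posD_items (arr : List Int) :
    (posD arr).items = (PySem.List.enumerate (valsOf arr) 0).map (fun kv => (kv.2, kv.1)) := by
  unfold posD
  rw [PySem.Dict.items_foldl_insert_fresh (PySem.List.enumerate (valsOf arr) 0)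
        (fun kv => kv.2) (fun kv => kv.1) PySem.Dict.empty
        (fun a _ => PySem.Dict.contains_empty _)
        (by rw [PySem.List.map_snd_enumerate]; exact vals_nodup arr)]
  rfl

theorem posD_keys_nodup (arr : List Int) : (posD arr).keys.Nodup := by
  have : (posD arr).keys = (PySem.List.enumerate (valsOf arr) 0).map (fun kv => kv.2) := by
    show (posD arr).items.map (fun p => p.1) = _
    rw [posD_items]
    rw [List.map_map]
    rfl
  rw [this, PySem.List.map_snd_enumerate]
  exact vals_nodup arr

theorem posOf_getElem (arr : List Int) (k : Nat) (hk : k < (valsOf arr).length) :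
    posOf arr (valsOf arr)[k] = (k : Int) := by
  unfold posOf
  have hmem : ((valsOf arr)[k], (k : Int)) ∈ (posD arr).items := by
    rw [posD_items]
    refine List.mem_map.mpr ⟨((k : Int), (valsOf arr)[k]), ?_, rfl⟩
    have hk' : k < (PySem.List.enumerate (valsOf arr) 0).length := by
      rw [PySem.List.length_enumerate]; exact hk
    have h := PySem.List.getElem_enumerate (valsOf arr) 0 k hk'
    simp only [zero_add] at h
    rw [← h]
    exact List.getElem_mem hk'
  exact PySem.Dict.getD_of_mem_items _ hmem (posD_keys_nodup arr) 0

theorem posOf_range (arr : List Int) (x : Int) (hx : x ∈ arr) :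
    0 ≤ posOf arr x ∧ posOf arr x < ((valsOf arr).length : Int) := by
  obtain ⟨k, hk, rfl⟩ := List.getElem_of_mem ((mem_vals arr x).mpr hx)
  rw [posOf_getElem arr k hk]
  omega

theorem pos_lt_iff (arr : List Int) (x y : Int) (hx : x ∈ arr) (hy : y ∈ arr) :
    posOf arr x < posOf arr y ↔ x < y := by
  obtain ⟨k, hk, rfl⟩ := List.getElem_of_mem ((mem_vals arr x).mpr hx)
  obtain ⟨k', hk', rfl⟩ := List.getElem_of_mem ((mem_vals arr y).mpr hy)
  rw [posOf_getElem arr k hk, posOf_getElem arr k' hk']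
  have hpw := List.pairwise_iff_getElem.mp (vals_pairwise arr)
  constructor
  · intro h
    exact hpw k k' hk hk' (by omega)
  · intro h
    by_contra hc
    rcases Nat.lt_or_ge k' k with h' | h'
    · exact absurd (hpw k' k hk' hk h') (by omega)
    · have : k = k' := by omega
      subst this
      omega

-- ---- the per-step best and the spec dp/parent lists ----
def bestP (arr dp : List Int) (i : Int) : Int × Int :=
  (PySem.List.pyRange 0 i 1).foldl
    (fun c j => if PySem.List.pyGetD arr j 0 < PySem.List.pyGetD arr i 0 ∧
                   PySem.List.pyGetD dp j 0 + 1 > c.1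
                then (PySem.List.pyGetD dp j 0 + 1, j) else c) (1, -1)

def dps (arr : List Int) : Nat → List Int × List Int
  | 0 => ([], [])
  | i+1 =>
    let s := dps arr i
    let b := bestP arr s.1 i
    (s.1 ++ [b.1], s.2 ++ [b.2])

def dval (arr : List Int) (i : Nat) : Int := (bestP arr (dps arr i).1 (i : Int)).1
def pval (arr : List Int) (i : Nat) : Int := (bestP arr (dps arr i).1 (i : Int)).2

theorem dps_len (arr : List Int) (i : Nat) :
    (dps arr i).1.length = i ∧ (dps arr i).2.length = i := by
  induction i with
  | zero => simp [dps]
  | succ k ih => simp [dps, ih]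

theorem getD_concat_lt {α : Type} (l : List α) (x d : α) (j : Nat) (h : j < l.length) :
    (l ++ [x]).getD j d = l.getD j d := by
  unfold List.getD
  rw [List.getElem?_append_left h]

theorem getD_concat_len {α : Type} (l : List α) (x d : α) :
    (l ++ [x]).getD l.length d = x := by
  unfold List.getD
  rw [List.getElem?_concat_length]
  rfl

theorem dps_getD (arr : List Int) (i j : Nat) (h : j < i) :
    (dps arr i).1.getD j 0 = dval arr j ∧ (dps arr i).2.getD j 0 = pval arr j := by
  induction i with
  | zero => omega
  | succ k ih =>
    have hlen := dps_len arr k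
    show ((dps arr k).1 ++ [(bestP arr (dps arr k).1 (k : Int)).1]).getD j 0 = _ ∧
         ((dps arr k).2 ++ [(bestP arr (dps arr k).1 (k : Int)).2]).getD j 0 = _
    by_cases hj : j < k
    · rw [getD_concat_lt _ _ _ _ (by omega), getD_concat_lt _ _ _ _ (by omega)]
      exact ih hj
    · have hjk : j = k := by omega
      subst hjk
      constructor
      · have h1 := getD_concat_len (dps arr j).1 (bestP arr (dps arr j).1 (j : Int)).1 0
        rw [hlen.1] at h1
        rw [h1]
        rfl
      · have h2 := getD_concat_len (dps arr j).2 (bestP arr (dps arr j).1 (j : Int)).2 0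
        rw [hlen.2] at h2
        rw [h2]
        rfl

theorem bestP_fst_ge (arr dp : List Int) (i : Int) : 1 ≤ (bestP arr dp i).1 := by
  unfold bestP
  refine List.foldlRecOn (motive := fun (c : Int × Int) => 1 ≤ c.1) _ _ (by norm_num) ?_
  intro c hc j _
  split_ifs with h
  · simp only
    omega
  · exact hc

theorem dval_ge_one (arr : List Int) (i : Nat) : 1 ≤ dval arr i := bestP_fst_ge _ _ _

-- ---- B-side candidate accumulation ----
def bigB (arr : List Int) (i : Nat) (b : Int) : Int × Int :=
  (PySem.List.pyRange 0 (i : Int) 1).foldl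
    (fun c j => better c (if posOf arr (PySem.List.pyGetD arr j 0) < b
                          then (dval arr j.toNat, j) else (0, -1)))
    (0, -1)

-- A's inner-scan step on the finished prefix, and B's candidate step, as named functions
def fA (arr : List Int) (i : Nat) (c : Int × Int) (j : Int) : Int × Int :=
  if PySem.List.pyGetD arr j 0 < PySem.List.pyGetD arr (i : Int) 0 ∧
     PySem.List.pyGetD (dps arr i).1 j 0 + 1 > c.1
  then (PySem.List.pyGetD (dps arr i).1 j 0 + 1, j) else c

def fQ (arr : List Int) (i : Nat) (c : Int × Int) (j : Int) : Int × Int :=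
  better c (if posOf arr (PySem.List.pyGetD arr j 0) < posOf arr (PySem.List.pyGetD arr (i : Int) 0)
            then (dval arr j.toNat, j) else (0, -1))

theorem core_aux (arr : List Int) (i : Nat) (hi : i < arr.length) :
    ∀ (k : Nat), k ≤ i →
      ((PySem.List.pyRange 0 (k : Int) 1).foldl (fA arr i) (1, -1) =
        (((PySem.List.pyRange 0 (k : Int) 1).foldl (fQ arr i) (0, -1)).1 + 1,
         ((PySem.List.pyRange 0 (k : Int) 1).foldl (fQ arr i) (0, -1)).2)) ∧
      ((PySem.List.pyRange 0 (k : Int) 1).foldl (fQ arr i) (0, -1) = (0, -1) ∨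
       (1 ≤ ((PySem.List.pyRange 0 (k : Int) 1).foldl (fQ arr i) (0, -1)).1 ∧
        0 ≤ ((PySem.List.pyRange 0 (k : Int) 1).foldl (fQ arr i) (0, -1)).2 ∧
        ((PySem.List.pyRange 0 (k : Int) 1).foldl (fQ arr i) (0, -1)).2 < (k : Int))) := by
  intro k
  induction k with
  | zero =>
    intro _
    norm_num [PySem.List.pyRange_one_eq_nil]
  | succ k ih =>
    intro hk1
    obtain ⟨ihA, ihQ⟩ := ih (by omega)
    set Q := (PySem.List.pyRange 0 (k : Int) 1).foldl (fQ arr i) ((0 : Int), (-1 : Int)) with hQdef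
    have hrange : PySem.List.pyRange 0 ((k + 1 : Nat) : Int) 1 =
        PySem.List.pyRange 0 (k : Int) 1 ++ [(k : Int)] := by
      push_cast
      exact PySem.List.pyRange_one_succ_right (by positivity)
    rw [hrange, List.foldl_append, List.foldl_append]
    simp only [List.foldl_cons, List.foldl_nil]
    rw [ihA, ← hQdef]
    -- facts about position k
    have hk : k < i := by omega
    have hdp : PySem.List.pyGetD (dps arr i).1 (k : Int) 0 = dval arr k := by
      rw [PySem.List.pyGetD_natCast]
      exact (dps_getD arr i k hk).1
    have hmemk : PySem.List.pyGetD arr (k : Int) 0 ∈ arr := by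
      rw [PySem.List.pyGetD_eq_getElem arr 0 (by positivity) (by exact_mod_cast by omega)]
      exact List.getElem_mem _
    have hmemi : PySem.List.pyGetD arr (i : Int) 0 ∈ arr := by
      rw [PySem.List.pyGetD_eq_getElem arr 0 (by positivity) (by exact_mod_cast hi)]
      exact List.getElem_mem _
    have hcond : (posOf arr (PySem.List.pyGetD arr (k : Int) 0) <
                  posOf arr (PySem.List.pyGetD arr (i : Int) 0)) ↔
                 (PySem.List.pyGetD arr (k : Int) 0 < PySem.List.pyGetD arr (i : Int) 0) :=
      pos_lt_iff arr _ _ hmemk hmemi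
    have hd1 : 1 ≤ dval arr k := dval_ge_one arr k
    by_cases hvc : PySem.List.pyGetD arr (k : Int) 0 < PySem.List.pyGetD arr (i : Int) 0
    · -- the value condition holds: a real candidate (dval k, k)
      have hfq : fQ arr i Q (k : Int) = better Q (dval arr k, (k : Int)) := by
        unfold fQ
        rw [if_pos (hcond.mpr hvc)]
        simp
      rcases Int.lt_trichotomy Q.1 (dval arr k) with hcmp | hcmp | hcmp
      · -- candidate strictly better: both take it
        have hfa : fA arr i ((Q.1 + 1, Q.2) : Int × Int) (k : Int) = (dval arr k + 1, (k : Int)) := by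
          unfold fA
          rw [if_pos ⟨hvc, by rw [hdp]; simp; omega⟩, hdp]
        have hfq2 : better Q (dval arr k, (k : Int)) = (dval arr k, (k : Int)) := by
          unfold better
          rw [if_pos (Or.inl (by simpa using hcmp))]
        rw [hfa, hfq, hfq2]
        refine ⟨rfl, Or.inr ⟨by simpa using hd1, by simp, by push_cast; omega⟩⟩
      · -- tie on dp: A keeps the earlier index, and so does better (Q.2 < k)
        have hQne : 1 ≤ Q.1 ∧ 0 ≤ Q.2 ∧ Q.2 < (k : Int) := by
          rcases ihQ with h | h
          · rw [h] at hcmp; simp at hcmp; omega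
          · exact h
        have hfa : fA arr i ((Q.1 + 1, Q.2) : Int × Int) (k : Int) = (Q.1 + 1, Q.2) := by
          unfold fA
          rw [if_neg]
          rw [hdp]
          simp
          intro _
          omega
        have hfq2 : better Q (dval arr k, (k : Int)) = Q := by
          unfold better
          rw [if_neg]
          simp
          constructor
          · omega
          · intro _
            omega
        rw [hfa, hfq, hfq2]
        exact ⟨rfl, Or.inr ⟨hQne.1, hQne.2.1, by push_cast; omega⟩⟩
      · -- candidate worse: both keep
        have hfa : fA arr i ((Q.1 + 1, Q.2) : Int × Int) (k : Int) = (Q.1 + 1, Q.2) := by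
          unfold fA
          rw [if_neg]
          rw [hdp]
          simp
          intro _
          omega
        have hfq2 : better Q (dval arr k, (k : Int)) = Q := by
          unfold better
          rw [if_neg]
          simp
          constructor
          · omega
          · intro _
            omega
        rw [hfa, hfq, hfq2]
        refine ⟨rfl, ?_⟩
        rcases ihQ with h | h
        · exact Or.inl h
        · exact Or.inr ⟨h.1, h.2.1, by push_cast; omega⟩
    · -- value condition fails: no candidate on either side
      have hfa : fA arr i ((Q.1 + 1, Q.2) : Int × Int) (k : Int) = (Q.1 + 1, Q.2) := by
        unfold fA
        rw [if_neg]
        intro h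
        exact hvc h.1
      have hfq : fQ arr i Q (k : Int) = Q := by
        unfold fQ
        rw [if_neg (fun h => hvc (hcond.mp h))]
        refine better_e_right Q ?_
        rcases ihQ with h | h
        · exact Or.inl h
        · exact Or.inr h.1
      rw [hfa, hfq]
      refine ⟨rfl, ?_⟩
      rcases ihQ with h | h
      · exact Or.inl h
      · exact Or.inr ⟨h.1, h.2.1, by push_cast; omega⟩

-- the mathematical core: A's inner scan equals the shifted best over the value-prefix
theorem core (arr : List Int) (i : Nat) (hi : i < arr.length) :
    bestP arr (dps arr i).1 (i : Int) =
      ((bigB arr i (posOf arr (PySem.List.pyGetD arr (i : Int) 0))).1 + 1,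
       (bigB arr i (posOf arr (PySem.List.pyGetD arr (i : Int) 0))).2) := by
  have h := (core_aux arr i hi i le_rfl).1
  exact h

-- ---- shared tree/roots accumulation ----
def tree0D (arr : List Int) : PySem.Dict Int (List Int) :=
  (PySem.List.pyRange 0 (arr.length : Int) 1).foldl (fun d i => d.insert i []) PySem.Dict.empty

def treeAcc (arr : List Int) (i : Nat) : PySem.Dict Int (List Int) × List Int :=
  (PySem.List.pyRange 0 (i : Int) 1).foldl
    (fun t j => if pval arr j.toNat = -1 then (t.1, t.2 ++ [j])
                else (t.1.modify (pval arr j.toNat) [] (· ++ [j]), t.2))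
    (tree0D arr, [])

-- ---- A-side characterisation ----
theorem getD_set_self {α : Type} (l : List α) (n : Nat) (v d : α) (h : n < l.length) :
    (l.set n v).getD n d = v := by
  unfold List.getD
  rw [List.getElem?_set]
  simp [h]

theorem getD_set_ne {α : Type} (l : List α) (n m : Nat) (v d : α) (h : n ≠ m) :
    (l.set n v).getD m d = l.getD m d := by
  unfold List.getD
  rw [List.getElem?_set]
  simp [h]

theorem set_self {α : Type} (l : List α) (n : Nat) (v : α) (h : n < l.length) (hv : l[n] = v) :
    l.set n v = l := by
  apply List.ext_getElem (by simp)
  intro j h1 h2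
  rw [List.getElem_set]
  split_ifs with he
  · subst he
    exact hv.symm
  · rfl

theorem set_append_len {α : Type} (l1 l2 : List α) (y v : α) :
    (l1 ++ y :: l2).set l1.length v = l1 ++ v :: l2 := by
  rw [List.set_append]
  simp

theorem a_inner (arr : List Int) (i : Nat) (hi : i < arr.length) (k : Nat) (hk : k ≤ i) :
    (PySem.List.pyRange 0 (k : Int) 1).foldl
      (fun (s : List Int × List Int) j =>
        if PySem.List.pyGetD arr j 0 < PySem.List.pyGetD arr (i : Int) 0 ∧
           PySem.List.pyGetD s.1 j 0 + 1 > PySem.List.pyGetD s.1 (i : Int) 0 then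
          (PySem.List.pySetD s.1 (i : Int) (PySem.List.pyGetD s.1 j 0 + 1),
           PySem.List.pySetD s.2 (i : Int) j)
        else s)
      ((dps arr i).1 ++ List.replicate (arr.length - i) 1,
       (dps arr i).2 ++ List.replicate (arr.length - i) (-1)) =
    (((dps arr i).1 ++ List.replicate (arr.length - i) 1).set i
        ((PySem.List.pyRange 0 (k : Int) 1).foldl (fA arr i) (1, -1)).1,
     ((dps arr i).2 ++ List.replicate (arr.length - i) (-1)).set i
        ((PySem.List.pyRange 0 (k : Int) 1).foldl (fA arr i) (1, -1)).2) := by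
  have hlen := dps_len arr i
  have hD : ((dps arr i).1 ++ List.replicate (arr.length - i) 1).length = arr.length := by
    simp [hlen.1]
    omega
  have hP : ((dps arr i).2 ++ List.replicate (arr.length - i) (-1)).length = arr.length := by
    simp [hlen.2]
    omega
  induction k with
  | zero =>
    rw [show ((0 : Nat) : Int) = 0 from rfl, PySem.List.pyRange_one_eq_nil le_rfl]
    simp only [List.foldl_nil]
    have e1 : ((dps arr i).1 ++ List.replicate (arr.length - i) 1)[i]'(by omega) = 1 := by
      rw [List.getElem_append_right (by omega)]
      exact List.getElem_replicate _
    have e2 : ((dps arr i).2 ++ List.replicate (arr.length - i) (-1))[i]'(by omega) = -1 := by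
      rw [List.getElem_append_right (by omega)]
      exact List.getElem_replicate _
    rw [set_self _ _ _ (by omega) e1, set_self _ _ _ (by omega) e2]
  | succ k ih =>
    have ih' := ih (by omega)
    have hrange : PySem.List.pyRange 0 ((k + 1 : Nat) : Int) 1 =
        PySem.List.pyRange 0 (k : Int) 1 ++ [(k : Int)] := by
      push_cast
      exact PySem.List.pyRange_one_succ_right (by positivity)
    rw [hrange, List.foldl_append, List.foldl_append, ih']
    simp only [List.foldl_cons, List.foldl_nil]
    set c := (PySem.List.pyRange 0 (k : Int) 1).foldl (fA arr i) ((1 : Int), (-1 : Int)) with hc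
    have hkd : k < (dps arr i).1.length := by omega
    have r1 : PySem.List.pyGetD
        (((dps arr i).1 ++ List.replicate (arr.length - i) 1).set i c.1) (k : Int) 0 =
        dval arr k := by
      rw [PySem.List.pyGetD_natCast, getD_set_ne _ _ _ _ _ (by omega),
          List.getD_append _ _ _ _ hkd]
      exact (dps_getD arr i k (by omega)).1
    have r2 : PySem.List.pyGetD
        (((dps arr i).1 ++ List.replicate (arr.length - i) 1).set i c.1) (i : Int) 0 = c.1 := by
      rw [PySem.List.pyGetD_natCast, getD_set_self _ _ _ _ (by omega)]
    have rA : PySem.List.pyGetD (dps arr i).1 (k : Int) 0 = dval arr k := by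
      rw [PySem.List.pyGetD_natCast]
      exact (dps_getD arr i k (by omega)).1
    have hstep : fA arr i c (k : Int) =
        if PySem.List.pyGetD arr (k : Int) 0 < PySem.List.pyGetD arr (i : Int) 0 ∧
           dval arr k + 1 > c.1
        then (dval arr k + 1, (k : Int)) else c := by
      unfold fA
      simp only [rA]
    simp only [r1, r2, hstep]
    by_cases hcnd : PySem.List.pyGetD arr (k : Int) 0 < PySem.List.pyGetD arr (i : Int) 0 ∧
        dval arr k + 1 > c.1
    · rw [if_pos hcnd, if_pos hcnd]
      simp only
      rw [PySem.List.pySetD_of_nonneg _ _ (by positivity),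
          PySem.List.pySetD_of_nonneg _ _ (by positivity)]
      simp only [Int.toNat_natCast]
      rw [List.set_set, List.set_set]
    · rw [if_neg hcnd, if_neg hcnd]

theorem a1 (arr : List Int) : ∀ (i : Nat), i ≤ arr.length →
    (PySem.List.pyRange 0 (i : Int) 1).foldl
      (fun (s : List Int × List Int) i =>
        (PySem.List.pyRange 0 i 1).foldl
          (fun (s : List Int × List Int) j =>
            if PySem.List.pyGetD arr j 0 < PySem.List.pyGetD arr i 0 ∧
               PySem.List.pyGetD s.1 j 0 + 1 > PySem.List.pyGetD s.1 i 0 then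
              (PySem.List.pySetD s.1 i (PySem.List.pyGetD s.1 j 0 + 1),
               PySem.List.pySetD s.2 i j)
            else s) s)
      (List.replicate arr.length 1, List.replicate arr.length (-1)) =
    ((dps arr i).1 ++ List.replicate (arr.length - i) 1,
     (dps arr i).2 ++ List.replicate (arr.length - i) (-1)) := by
  intro i
  induction i with
  | zero =>
    intro _
    rw [show ((0 : Nat) : Int) = 0 from rfl, PySem.List.pyRange_one_eq_nil le_rfl]
    simp [dps]
  | succ i ih =>
    intro h
    have hrange : PySem.List.pyRange 0 ((i + 1 : Nat) : Int) 1 =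
        PySem.List.pyRange 0 (i : Int) 1 ++ [(i : Int)] := by
      push_cast
      exact PySem.List.pyRange_one_succ_right (by positivity)
    rw [hrange, List.foldl_append, ih (by omega)]
    simp only [List.foldl_cons, List.foldl_nil]
    rw [a_inner arr i (by omega) i le_rfl]
    have hlen := dps_len arr i
    have hb : (PySem.List.pyRange 0 (i : Int) 1).foldl (fA arr i) (1, -1) =
        bestP arr (dps arr i).1 (i : Int) := rfl
    rw [hb]
    have hrep1 : List.replicate (arr.length - i) (1 : Int) =
        1 :: List.replicate (arr.length - (i + 1)) 1 := by
      rw [show arr.length - i = (arr.length - (i + 1)) + 1 from by omega, List.replicate_succ]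
    have hrep2 : List.replicate (arr.length - i) (-1 : Int) =
        -1 :: List.replicate (arr.length - (i + 1)) (-1) := by
      rw [show arr.length - i = (arr.length - (i + 1)) + 1 from by omega, List.replicate_succ]
    rw [hrep1, hrep2]
    have s1 := set_append_len (dps arr i).1 (List.replicate (arr.length - (i + 1)) (1 : Int)) 1
      (bestP arr (dps arr i).1 (i : Int)).1
    rw [hlen.1] at s1
    have s2 := set_append_len (dps arr i).2 (List.replicate (arr.length - (i + 1)) (-1 : Int)) (-1)
      (bestP arr (dps arr i).1 (i : Int)).2
    rw [hlen.2] at s2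
    rw [s1, s2]
    show _ = ((dps arr i).1 ++ [(bestP arr (dps arr i).1 (i : Int)).1] ++ _,
              (dps arr i).2 ++ [(bestP arr (dps arr i).1 (i : Int)).2] ++ _)
    simp [List.append_assoc]

theorem a2 (arr : List Int) :
    (PySem.List.pyRange 0 (arr.length : Int) 1).foldl
      (fun (t : PySem.Dict Int (List Int) × List Int) i =>
        if PySem.List.pyGetD (dps arr arr.length).2 i 0 ≠ -1 then
          (t.1.modify (PySem.List.pyGetD (dps arr arr.length).2 i 0) [] (· ++ [i]), t.2)
        else (t.1, t.2 ++ [i])) (tree0D arr, []) = treeAcc arr arr.length := by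
  unfold treeAcc
  apply PySem.List.foldl_congr_mem
  intro acc x hx
  rw [PySem.List.mem_pyRange_one] at hx
  have hread : PySem.List.pyGetD (dps arr arr.length).2 x 0 = pval arr x.toNat := by
    rw [show x = ((x.toNat : Nat) : Int) from by omega, PySem.List.pyGetD_natCast]
    exact (dps_getD arr arr.length x.toNat (by omega)).2
  simp only [hread]
  by_cases hp : pval arr x.toNat = -1
  · rw [if_neg (fun hcon => hcon hp), if_pos hp]
  · rw [if_pos hp, if_neg hp]

theorem a_side (arr : List Int) :
    build_pure_tree arr = ((treeAcc arr arr.length).1.items, (treeAcc arr arr.length).2, (dps arr arr.length).1) := by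
  have h1 := a1 arr arr.length le_rfl
  simp only [Nat.sub_self, List.replicate_zero, List.append_nil] at h1
  unfold build_pure_tree
  simp only
  rw [h1]
  simp only
  rw [show (List.foldl (fun (d : PySem.Dict Int (List Int)) (i : Int) => d.insert i [])
        PySem.Dict.empty (PySem.List.pyRange 0 (arr.length : Int) 1)) = tree0D arr from rfl,
      a2 arr]

-- ---- B-side characterisation ----
theorem vals_ne_nil (arr : List Int) (hne : arr ≠ []) : valsOf arr ≠ [] := by
  intro h
  rcases List.exists_mem_of_ne_nil arr hne with ⟨x, hx⟩
  have := (mem_vals arr x).mpr hx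
  rw [h] at this
  exact absurd this (List.not_mem_nil)

theorem b1 (arr : List Int) (hne : arr ≠ []) : ∀ (i : Nat), i ≤ arr.length →
    ∃ seg : Seg,
      (PySem.List.pyRange 0 (i : Int) 1).foldl
        (fun (s : PySem.Dict Int (List Int) × List Int × List Int × Seg) i =>
          let p := (posD arr).getD (PySem.List.pyGetD arr i 0) 0
          let q := segQuery s.2.2.2 0 ((valsOf arr).length : Int) p
          let dp' := s.2.2.1 ++ [q.1 + 1]
          let tr := if q.2 == -1 then (s.1, s.2.1 ++ [i])
                    else (s.1.modify q.2 [] (· ++ [i]), s.2.1)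
          (tr.1, tr.2, dp', segUpdate s.2.2.2 0 ((valsOf arr).length : Int) p (q.1 + 1, i)))
        (tree0D arr, ([] : List Int), ([] : List Int), segBuild 0 ((valsOf arr).length : Int)) =
        ((treeAcc arr i).1, (treeAcc arr i).2, (dps arr i).1, seg) ∧
      Shape seg 0 ((valsOf arr).length : Int) ∧
      (∀ b, segQuery seg 0 ((valsOf arr).length : Int) b = bigB arr i b) := by
  have hm : 0 < ((valsOf arr).length : Int) := by
    have := vals_ne_nil arr hne
    have : valsOf arr ≠ [] := this
    have hl : 0 < (valsOf arr).length := List.length_pos_of_ne_nil this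
    exact_mod_cast hl
  intro i
  induction i with
  | zero =>
    intro _
    refine ⟨segBuild 0 ((valsOf arr).length : Int), ?_, shape_build _ _ hm, ?_⟩
    · rw [show ((0 : Nat) : Int) = 0 from rfl, PySem.List.pyRange_one_eq_nil le_rfl]
      rfl
    · intro b
      rw [query_build]
      unfold bigB
      rw [show ((0 : Nat) : Int) = 0 from rfl, PySem.List.pyRange_one_eq_nil le_rfl]
      rfl
  | succ i ih =>
    intro h
    obtain ⟨seg, hfold, hshape, hquery⟩ := ih (by omega)
    have hrange : PySem.List.pyRange 0 ((i + 1 : Nat) : Int) 1 =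
        PySem.List.pyRange 0 (i : Int) 1 ++ [(i : Int)] := by
      push_cast
      exact PySem.List.pyRange_one_succ_right (by positivity)
    -- facts about this step
    have hmemi : PySem.List.pyGetD arr (i : Int) 0 ∈ arr := by
      rw [PySem.List.pyGetD_eq_getElem arr 0 (by positivity) (by exact_mod_cast by omega)]
      exact List.getElem_mem _
    have hpos := posOf_range arr _ hmemi
    have hq : segQuery seg 0 ((valsOf arr).length : Int)
        (posOf arr (PySem.List.pyGetD arr (i : Int) 0)) =
        bigB arr i (posOf arr (PySem.List.pyGetD arr (i : Int) 0)) := hquery _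
    have hcore := core arr i (by omega)
    have hq1 : (segQuery seg 0 ((valsOf arr).length : Int)
        (posOf arr (PySem.List.pyGetD arr (i : Int) 0))).1 + 1 = dval arr i := by
      rw [hq]
      unfold dval
      rw [hcore]
    have hq2 : (segQuery seg 0 ((valsOf arr).length : Int)
        (posOf arr (PySem.List.pyGetD arr (i : Int) 0))).2 = pval arr i := by
      rw [hq]
      unfold pval
      rw [hcore]
    have htree : treeAcc arr (i + 1) =
        (if pval arr i = -1 then ((treeAcc arr i).1, (treeAcc arr i).2 ++ [(i : Int)])
         else ((treeAcc arr i).1.modify (pval arr i) [] (· ++ [(i : Int)]), (treeAcc arr i).2)) := by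
      unfold treeAcc
      rw [hrange, List.foldl_append]
      simp only [List.foldl_cons, List.foldl_nil, Int.toNat_natCast]
    have hdp1 : (dps arr (i + 1)).1 = (dps arr i).1 ++ [dval arr i] := rfl
    have hbig : ∀ b, bigB arr (i + 1) b =
        better (bigB arr i b)
          (if posOf arr (PySem.List.pyGetD arr (i : Int) 0) < b
           then (dval arr i, (i : Int)) else (0, -1)) := by
      intro b
      unfold bigB
      rw [hrange, List.foldl_append]
      simp only [List.foldl_cons, List.foldl_nil, Int.toNat_natCast]
    refine ⟨segUpdate seg 0 ((valsOf arr).length : Int)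
        (posOf arr (PySem.List.pyGetD arr (i : Int) 0))
        ((segQuery seg 0 ((valsOf arr).length : Int)
          (posOf arr (PySem.List.pyGetD arr (i : Int) 0))).1 + 1, (i : Int)), ?_, ?_, ?_⟩
    · rw [hrange, List.foldl_append, hfold]
      simp only [List.foldl_cons, List.foldl_nil]
      show (_, _, _, _) = (_, _, _, _)
      rw [show (posD arr).getD (PySem.List.pyGetD arr ((i : Nat) : Int) 0) 0 =
            posOf arr (PySem.List.pyGetD arr ((i : Nat) : Int) 0) from rfl]
      rw [htree, hdp1, hq1, hq2]
      by_cases hp : pval arr i = -1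
      · simp only [hp, beq_self_eq_true, if_true]
      · have : (pval arr i == -1) = false := by
          simp [hp]
        simp only [this, if_neg hp, Bool.false_eq_true, if_false]
    · exact shape_update _ _ _ _ _ hshape
    · intro b
      rw [query_update _ _ _ _ _ hshape hpos.1 hpos.2 b, hquery b, hbig b, hq1]

theorem b_side (arr : List Int) :
    build_pure_tree_alt arr = ((treeAcc arr arr.length).1.items, (treeAcc arr arr.length).2, (dps arr arr.length).1) := by
  by_cases hne : arr = []
  · subst hne
    rfl
  · have hm : 0 < ((valsOf arr).length : Int) := by
      have hl : 0 < (valsOf arr).length := List.length_pos_of_ne_nil (vals_ne_nil arr hne)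
      exact_mod_cast hl
    obtain ⟨seg, hfold, _, _⟩ := b1 arr hne arr.length le_rfl
    unfold build_pure_tree_alt
    simp only
    rw [show PySem.List.sorted (PySem.Set.ofList arr) (fun x => x) false = valsOf arr from rfl]
    rw [show (PySem.List.enumerate (valsOf arr) 0).foldl
          (fun (d : PySem.Dict Int Int) kv => d.insert kv.2 kv.1) PySem.Dict.empty = posD arr from rfl]
    rw [show (PySem.List.pyRange 0 (arr.length : Int) 1).foldl
          (fun (d : PySem.Dict Int (List Int)) i => d.insert i []) PySem.Dict.empty = tree0D arr from rfl]
    rw [if_pos hm]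
    rw [hfold]

-- ===== VERDICT (by name: the statement is the Claim_ definition above) =====
theorem build_pure_tree_spec : Claim_equal_build_pure_tree := by
  intro arr _
  unfold Spec_build_pure_tree
  rw [a_side, b_side]
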